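-- pv_equiv track=rewrite | github.com/Adg47/GoogleHashCode2017 | remplissage auto backbone.py | mini
-- ===== SOURCE A (Python) =====
-- def mini(liste):
--     min=liste[0]
--     for i in range(0,len(liste)):
--         if liste[i] < min :
--             min=liste[i]
--     for i in range (0,len(liste)):
--         if liste[i] == min:
--             j=i
--     return(min,j)             #retourne le minimum (mini(liste)[0]) et l'indice de la valeur minimum (mini(liste)[1]) PAS OPTIMISE MAIS OSEF SAMER
-- ===== SOURCE B (Python) =====
-- def mini(liste):
--     m = liste[0]
--     j = 0
--     for i, x in enumerate(liste):
--         if x <= m: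
--             m = x
--             j = i
--     return (m, j)
-- ===== Notes on version B (the rewrite author's own statement) =====
-- stated objective: simpler
-- what changed: one linear pass maintaining the pair (current minimum, last index achieving it) replaces A's two sequential scans (one for the minimum, one for its last index)
import Mathlib
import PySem

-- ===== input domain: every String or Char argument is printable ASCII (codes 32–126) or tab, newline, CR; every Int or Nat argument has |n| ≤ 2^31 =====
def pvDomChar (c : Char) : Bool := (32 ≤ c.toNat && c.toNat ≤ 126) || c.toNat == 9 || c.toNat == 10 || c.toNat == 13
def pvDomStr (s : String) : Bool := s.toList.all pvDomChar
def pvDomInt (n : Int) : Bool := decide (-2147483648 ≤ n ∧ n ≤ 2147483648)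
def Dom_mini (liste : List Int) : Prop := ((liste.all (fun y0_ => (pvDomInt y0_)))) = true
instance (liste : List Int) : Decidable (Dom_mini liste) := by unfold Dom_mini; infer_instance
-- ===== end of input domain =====

-- B replaces A's two scans (find min, then find its last index) by one pass carrying (min, last index); same values on nonempty lists.


-- ===== PORT A =====
-- liste[0] raises IndexError on []; Pre_mini excludes the empty list, so the 0 default is never read.
-- The second loop's j is unassigned before the loop (Option, none = UnboundLocalError); on a nonempty
-- Int list the minimum always occurs, so the final .getD 0 default is never read inside Pre_.
def mini (liste : List Int) : Int × Int :=
  let min0 : Int := PySem.List.pyGetD liste 0 0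
  let min1 : Int := (PySem.List.pyRange 0 (PySem.List.len liste) 1).foldl
      (fun m i => if PySem.List.pyGetD liste i 0 < m then PySem.List.pyGetD liste i 0 else m) min0
  let j : Option Int := (PySem.List.pyRange 0 (PySem.List.len liste) 1).foldl
      (fun j i => if PySem.List.pyGetD liste i 0 = min1 then some i else j) none
  (min1, j.getD 0)

-- ===== PORT B =====
-- liste[0] raises IndexError on []; Pre_mini excludes the empty list, so the 0 default is never read.
def mini_alt (liste : List Int) : Int × Int :=
  let m0 : Int := PySem.List.pyGetD liste 0 0
  (PySem.List.enumerate liste 0).foldl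
    (fun p ix => if ix.2 ≤ p.1 then (ix.2, ix.1) else p) (m0, 0)

-- ===== PRECONDITION & SPEC =====
-- Pre_mini excludes exactly the empty list, on which A raises IndexError at liste[0].
def Pre_mini (liste : List Int) : Prop := liste ≠ []
instance (liste : List Int) : Decidable (Pre_mini liste) := by unfold Pre_mini; infer_instance
def pvWitness_mini : List Int := [3, 1, 2, 1, 4]

def Spec_mini (liste : List Int) (out : Int × Int) : Prop := out = mini_alt liste
instance (liste : List Int) (out : Int × Int) : Decidable (Spec_mini liste out) := by unfold Spec_mini; infer_instance

-- ===== CLAIM (what is proved, stated in full; the proofs are below) =====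
def Claim_equal_mini : Prop := ∀ (liste : List Int), Dom_mini liste → Pre_mini liste → Spec_mini liste (mini liste)

-- ===== LEMMAS AND PROOFS =====

-- running minimum of A's first loop, as a fold over the list
def runMin (l : List Int) (m : Int) : Int :=
  l.foldl (fun m x => if x < m then x else m) m

-- last index (offset s) at which M occurs, defaulting to j
def lastIdx (l : List Int) (s : Int) (M : Int) (j : Int) : Int :=
  match l with
  | [] => j
  | x :: t => lastIdx t (s + 1) M (if x = M then s else j)

theorem runMin_le (l : List Int) (m : Int) : runMin l m ≤ m := by
  induction l generalizing m with
  | nil => simp [runMin]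
  | cons x t ih =>
      simp only [runMin, List.foldl]
      refine le_trans (ih _) ?_
      split <;> omega

theorem runMin_mem (l : List Int) (m : Int) : runMin l m = m ∨ runMin l m ∈ l := by
  induction l generalizing m with
  | nil => simp [runMin]
  | cons x t ih =>
      simp only [runMin, List.foldl] at *
      rcases ih (if x < m then x else m) with h | h
      · by_cases hx : x < m
        · rw [if_pos hx] at h ⊢; right; simp [h]
        · rw [if_neg hx] at h ⊢; left; exact h
      · right; exact List.mem_cons_of_mem _ h

theorem lastIdx_of_mem (l : List Int) (s M j j' : Int) (h : M ∈ l) :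
    lastIdx l s M j = lastIdx l s M j' := by
  induction l generalizing s j j' with
  | nil => simp at h
  | cons x t ih =>
      rcases List.mem_cons.mp h with rfl | h
      · simp [lastIdx]
      · simp only [lastIdx]
        exact ih _ _ _ h

-- the key invariant: B's single-pass fold computes (running min, last index of that min)
theorem fold_B (l : List Int) (s m j : Int) :
    (PySem.List.enumerate l s).foldl
      (fun p ix => if ix.2 ≤ p.1 then (ix.2, ix.1) else p) (m, j)
    = (runMin l m, lastIdx l s (runMin l m) j) := by
  induction l generalizing s m j with
  | nil => simp [runMin, lastIdx]
  | cons x t ih =>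
      rw [PySem.List.enumerate_cons]
      simp only [List.foldl]
      by_cases hle : x ≤ m
      · have hmin : (if x < m then x else m) = x := by split <;> omega
        rw [if_pos hle, ih]
        have hrm : runMin (x :: t) m = runMin t x := by
          simp [runMin, List.foldl, hmin]
        rw [hrm]
        by_cases hx : x = runMin t x
        · simp [lastIdx, ← hx]
        · have hmem : runMin t x ∈ t := by
            rcases runMin_mem t x with h | h
            · exact absurd h.symm hx
            · exact h
          rw [show lastIdx (x :: t) s (runMin t x) j
                = lastIdx t (s + 1) (runMin t x) (if x = runMin t x then s else j) from rfl]
          rw [if_neg hx]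
          exact congrArg (fun z => (runMin t x, z)) (lastIdx_of_mem t (s + 1) _ s j hmem)
      · have hmin : (if x < m then x else m) = m := by split <;> omega
        rw [if_neg hle, ih]
        have hrm : runMin (x :: t) m = runMin t m := by
          simp [runMin, List.foldl, hmin]
        rw [hrm]
        have hx : x ≠ runMin t m := by
          have := runMin_le t m; omega
        rw [show lastIdx (x :: t) s (runMin t m) j
              = lastIdx t (s + 1) (runMin t m) (if x = runMin t m then s else j) from rfl]
        rw [if_neg hx]

-- A's first loop, as a fold over the enumerated list, is runMin
theorem enum_fold_A1 (l : List Int) (s m : Int) :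
    (PySem.List.enumerate l s).foldl (fun m p => if p.2 < m then p.2 else m) m = runMin l m := by
  induction l generalizing s m with
  | nil => simp [runMin]
  | cons x t ih => rw [PySem.List.enumerate_cons]; simp only [List.foldl, runMin]; exact ih _ _

-- A's first loop, in its pyRange/pyGetD form
theorem range_fold_A1 (l : List Int) (m : Int) :
    (PySem.List.pyRange 0 (PySem.List.len l) 1).foldl
      (fun m i => if PySem.List.pyGetD l i 0 < m then PySem.List.pyGetD l i 0 else m) m
    = runMin l m := by
  have h := enum_fold_A1 l 0 m
  rw [PySem.List.enumerate_eq_map_pyRange (d := 0), List.foldl_map] at h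
  exact h

-- A's second loop, Option-defaulted, is lastIdx
theorem fold_A2 (l : List Int) (s M : Int) (j0 : Option Int) (j : Int) :
    ((PySem.List.enumerate l s).foldl
        (fun j p => if p.2 = M then some p.1 else j) j0).getD j
    = lastIdx l s M (j0.getD j) := by
  induction l generalizing s j0 with
  | nil => simp [lastIdx]
  | cons x t ih =>
      rw [PySem.List.enumerate_cons]
      simp only [List.foldl, lastIdx]
      rw [ih]
      by_cases hx : x = M
      · simp [hx]
      · simp [hx]

-- A's second loop, in its pyRange/pyGetD form
theorem range_fold_A2 (l : List Int) (M : Int) :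
    ((PySem.List.pyRange 0 (PySem.List.len l) 1).foldl
        (fun j i => if PySem.List.pyGetD l i 0 = M then some i else j) none).getD 0
    = lastIdx l 0 M 0 := by
  have h := fold_A2 l 0 M none 0
  rw [PySem.List.enumerate_eq_map_pyRange (d := 0), List.foldl_map] at h
  simpa using h

-- ===== VERDICT (by name: the statement is the Claim_ definition above) =====
theorem mini_spec : Claim_equal_mini := by
  intro liste _hdom _hpre
  unfold Spec_mini mini mini_alt
  simp only []
  rw [range_fold_A1, range_fold_A2, fold_B]
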